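-- pv_equiv track=rewrite | github.com/johngibbons/fantasy-baseball-helper | backend/simulation/draft_engine.py | _competitive_picks_until_next_turn
-- ===== SOURCE A (Python) =====
-- def snake_order(pick_index: int, num_teams: int) -> int:
--     """Return team index (0-based) for a given overall pick index in snake draft."""
--     rnd = pick_index // num_teams
--     pos = pick_index % num_teams
--     if rnd % 2 == 0:
--         return pos
--     return num_teams - 1 - pos
--
-- def _competitive_picks_until_next_turn(
--     current_pick: int,
--     my_team: int,
--     num_teams: int,
--     keeper_indices: set[int],
-- ) -> int:
--     """Count non-keeper picks between current_pick and my next turn."""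
--     count = 0
--     for i in range(current_pick + 1, num_teams * 25 + 1):
--         if snake_order(i, num_teams) == my_team:
--             return count
--         if i not in keeper_indices:
--             count += 1
--     return 999
-- ===== SOURCE B (Python) =====
-- def _team_pick(rnd, my_team, num_teams):
--     """Overall pick index of my_team in round rnd of a snake draft."""
--     if rnd % 2 == 0:
--         return rnd * num_teams + my_team
--     return rnd * num_teams + (num_teams - 1 - my_team)
--
-- def _competitive_picks_until_next_turn(current_pick, my_team, num_teams, keeper_indices):
--     """Count non-keeper picks between current_pick and my next turn (closed form)."""
--     if 0 <= my_team < num_teams: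
--         r = (current_pick + 1) // num_teams
--         nxt = _team_pick(r, my_team, num_teams)
--         if nxt <= current_pick:
--             nxt = _team_pick(r + 1, my_team, num_teams)
--         if nxt <= num_teams * 25:
--             keepers_between = sum(1 for k in keeper_indices if current_pick < k < nxt)
--             return (nxt - current_pick - 1) - keepers_between
--     return 999
-- ===== Notes on version B (the rewrite author's own statement) =====
-- stated objective: alternative
-- what changed: Replaces A's pick-by-pick search-and-count scan with a closed-form snake formula for the team's next pick index plus a single count over the keeper set.
-- outside the precondition, e.g. on _competitive_picks_until_next_turn(-1, 0, 0, set()): A raises ZeroDivisionError, B returns 999; on _competitive_picks_until_next_turn(-30, -2, -1, {5}): A returns 0, B returns 999; on _competitive_picks_until_next_turn(-60, 0, -2, set()): A returns 3, B returns 999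
import Mathlib
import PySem

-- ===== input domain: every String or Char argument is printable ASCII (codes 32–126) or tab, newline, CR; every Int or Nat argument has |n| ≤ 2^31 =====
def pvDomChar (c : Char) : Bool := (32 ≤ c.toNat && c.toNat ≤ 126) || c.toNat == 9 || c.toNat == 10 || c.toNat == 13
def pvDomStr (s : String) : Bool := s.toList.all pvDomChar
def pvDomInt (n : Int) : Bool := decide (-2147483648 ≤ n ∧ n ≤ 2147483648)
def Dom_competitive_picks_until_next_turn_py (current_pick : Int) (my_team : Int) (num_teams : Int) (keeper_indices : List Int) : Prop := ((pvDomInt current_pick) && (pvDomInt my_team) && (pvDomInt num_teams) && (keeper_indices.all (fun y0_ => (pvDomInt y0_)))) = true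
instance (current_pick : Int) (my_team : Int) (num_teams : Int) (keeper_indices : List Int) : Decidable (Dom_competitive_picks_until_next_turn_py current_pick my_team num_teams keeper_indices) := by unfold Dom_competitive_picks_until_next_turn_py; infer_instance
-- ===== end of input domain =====

-- B replaces A's pick-by-pick search-and-count scan with a closed-form snake formula for
-- the next turn plus a single count over the keeper set (objective: alternative algorithm).

-- ===== PORT A =====
def snake_order_py (pick_index : Int) (num_teams : Int) : Int :=
  let rnd := PySem.Int.floordiv pick_index num_teams
  let pos := PySem.Int.mod pick_index num_teams
  if PySem.Int.mod rnd 2 = 0 then pos else num_teams - 1 - pos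

def pvALoop (my_team : Int) (num_teams : Int) (keeper_indices : List Int) :
    List Int → Int → Int
  | [], _count => 999
  | i :: rest, count =>
    if snake_order_py i num_teams = my_team then count
    else if i ∈ keeper_indices then pvALoop my_team num_teams keeper_indices rest count
    else pvALoop my_team num_teams keeper_indices rest (count + 1)

def competitive_picks_until_next_turn_py (current_pick : Int) (my_team : Int) (num_teams : Int) (keeper_indices : List Int) : Int :=
  pvALoop my_team num_teams keeper_indices
    (PySem.List.pyRange (current_pick + 1) (num_teams * 25 + 1) 1) 0

-- ===== PORT B =====
def pvTeamPick (rnd : Int) (my_team : Int) (num_teams : Int) : Int :=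
  if PySem.Int.mod rnd 2 = 0 then rnd * num_teams + my_team
  else rnd * num_teams + (num_teams - 1 - my_team)

def competitive_picks_until_next_turn_py_alt (current_pick : Int) (my_team : Int) (num_teams : Int) (keeper_indices : List Int) : Int :=
  if 0 ≤ my_team ∧ my_team < num_teams then
    let r := PySem.Int.floordiv (current_pick + 1) num_teams
    let nxt0 := pvTeamPick r my_team num_teams
    let nxt := if nxt0 ≤ current_pick then pvTeamPick (r + 1) my_team num_teams else nxt0
    if nxt ≤ num_teams * 25 then
      (nxt - current_pick - 1) -
        (((PySem.Set.ofList keeper_indices).filter (fun k => current_pick < k ∧ k < nxt)).length : Int)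
    else 999
  else 999

-- ===== PRECONDITION & SPEC =====
-- Pre_ excludes only num_teams ≤ 0 with a non-empty pick range: there A either raises
-- ZeroDivisionError (num_teams = 0) or returns values produced by Python's
-- negative-divisor floordiv/modulo, which no snake draft specifies.
def Pre_competitive_picks_until_next_turn_py (current_pick : Int) (my_team : Int) (num_teams : Int) (keeper_indices : List Int) : Prop :=
  1 ≤ num_teams ∨ (num_teams ≤ 0 ∧ num_teams * 25 ≤ current_pick)
instance (current_pick : Int) (my_team : Int) (num_teams : Int) (keeper_indices : List Int) : Decidable (Pre_competitive_picks_until_next_turn_py current_pick my_team num_teams keeper_indices) := by unfold Pre_competitive_picks_until_next_turn_py; infer_instance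

def pvWitness_competitive_picks_until_next_turn_py : Int × Int × Int × List Int := (3, 1, 4, [5, 7])

def Spec_competitive_picks_until_next_turn_py (current_pick : Int) (my_team : Int) (num_teams : Int) (keeper_indices : List Int) (out : Int) : Prop := out = competitive_picks_until_next_turn_py_alt current_pick my_team num_teams keeper_indices
instance (current_pick : Int) (my_team : Int) (num_teams : Int) (keeper_indices : List Int) (out : Int) : Decidable (Spec_competitive_picks_until_next_turn_py current_pick my_team num_teams keeper_indices out) := by unfold Spec_competitive_picks_until_next_turn_py; infer_instance

-- ===== CLAIM (what is proved, stated in full; the proofs are below) =====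
def Claim_equal_competitive_picks_until_next_turn_py : Prop := ∀ (current_pick : Int) (my_team : Int) (num_teams : Int) (keeper_indices : List Int), Dom_competitive_picks_until_next_turn_py current_pick my_team num_teams keeper_indices → Pre_competitive_picks_until_next_turn_py current_pick my_team num_teams keeper_indices → Spec_competitive_picks_until_next_turn_py current_pick my_team num_teams keeper_indices (competitive_picks_until_next_turn_py current_pick my_team num_teams keeper_indices)

-- ===== LEMMAS AND PROOFS =====

-- arithmetic facts about PySem floordiv/mod with a positive divisor
theorem pv_mod_bounds (i nt : Int) (h : 1 ≤ nt) :
    0 ≤ PySem.Int.mod i nt ∧ PySem.Int.mod i nt < nt := by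
  rw [PySem.Int.mod_eq_emod_of_pos (show (0:Int) < nt by omega)]
  exact ⟨Int.emod_nonneg i (by omega), Int.emod_lt_of_pos i (by omega)⟩

theorem pv_snake_bounds (i nt : Int) (h : 1 ≤ nt) :
    0 ≤ snake_order_py i nt ∧ snake_order_py i nt < nt := by
  have hb := pv_mod_bounds i nt h
  simp only [snake_order_py]
  split <;> omega

theorem pv_teamPick_bounds (r mt nt : Int) (h : 1 ≤ nt) (hm : 0 ≤ mt ∧ mt < nt) :
    r * nt ≤ pvTeamPick r mt nt ∧ pvTeamPick r mt nt < (r + 1) * nt := by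
  have e : (r + 1) * nt = r * nt + nt := by ring
  simp only [pvTeamPick]
  split <;> constructor <;> linarith [hm.1, hm.2]

theorem pv_floordiv_teamPick (r mt nt : Int) (h : 1 ≤ nt) (hm : 0 ≤ mt ∧ mt < nt) :
    PySem.Int.floordiv (pvTeamPick r mt nt) nt = r := by
  exact (PySem.Int.floordiv_eq_iff_of_pos (by omega)).mpr (pv_teamPick_bounds r mt nt h hm)

theorem pv_match_teamPick (r mt nt : Int) (h : 1 ≤ nt) (hm : 0 ≤ mt ∧ mt < nt) :
    snake_order_py (pvTeamPick r mt nt) nt = mt := by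
  have hfd := pv_floordiv_teamPick r mt nt h hm
  have hmm := PySem.Int.floordiv_mul_add_mod (pvTeamPick r mt nt) nt
  rw [hfd] at hmm
  simp only [snake_order_py, hfd]
  by_cases hp : PySem.Int.mod r 2 = 0
  · rw [if_pos hp]
    have he : pvTeamPick r mt nt = r * nt + mt := by unfold pvTeamPick; rw [if_pos hp]
    rw [he] at hmm ⊢
    linarith
  · rw [if_neg hp]
    have he : pvTeamPick r mt nt = r * nt + (nt - 1 - mt) := by unfold pvTeamPick; rw [if_neg hp]
    rw [he] at hmm ⊢
    linarith

theorem pv_match_eq_teamPick (i mt nt : Int) (h : 1 ≤ nt) (hm : 0 ≤ mt ∧ mt < nt)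
    (hmatch : snake_order_py i nt = mt) :
    i = pvTeamPick (PySem.Int.floordiv i nt) mt nt := by
  have hmm := PySem.Int.floordiv_mul_add_mod i nt
  simp only [snake_order_py] at hmatch
  simp only [pvTeamPick]
  split
  · rename_i he
    rw [if_pos he] at hmatch
    linarith [hmm]
  · rename_i he
    rw [if_neg he] at hmatch
    linarith [hmm]

-- the smallest overall pick index ≥ lo at which it is my_team's turn
def pvNext (lo mt nt : Int) : Int :=
  let r := PySem.Int.floordiv lo nt
  let p := pvTeamPick r mt nt
  if p < lo then pvTeamPick (r + 1) mt nt else p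

theorem pv_next_ge (lo mt nt : Int) (h : 1 ≤ nt) (hm : 0 ≤ mt ∧ mt < nt) :
    lo ≤ pvNext lo mt nt := by
  have hfd := PySem.Int.floordiv_mul_add_mod lo nt
  have hb := pv_mod_bounds lo nt h
  have hb1 := pv_teamPick_bounds (PySem.Int.floordiv lo nt) mt nt h hm
  have hb2 := pv_teamPick_bounds (PySem.Int.floordiv lo nt + 1) mt nt h hm
  have e : (PySem.Int.floordiv lo nt + 1) * nt = PySem.Int.floordiv lo nt * nt + nt := by ring
  simp only [pvNext]
  split <;> linarith

theorem pv_next_match (lo mt nt : Int) (h : 1 ≤ nt) (hm : 0 ≤ mt ∧ mt < nt) :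
    snake_order_py (pvNext lo mt nt) nt = mt := by
  simp only [pvNext]
  split
  · exact pv_match_teamPick _ mt nt h hm
  · exact pv_match_teamPick _ mt nt h hm

theorem pv_next_least (lo mt nt : Int) (h : 1 ≤ nt) (hm : 0 ≤ mt ∧ mt < nt)
    (i : Int) (h1 : lo ≤ i) (h2 : i < pvNext lo mt nt) :
    snake_order_py i nt ≠ mt := by
  intro hmatch
  have hieq := pv_match_eq_teamPick i mt nt h hm hmatch
  have hfd := PySem.Int.floordiv_mul_add_mod lo nt
  have hbm := pv_mod_bounds lo nt h
  set r := PySem.Int.floordiv lo nt with hr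
  have hb1 := pv_teamPick_bounds r mt nt h hm
  have hb2 := pv_teamPick_bounds (r + 1) mt nt h hm
  have e1 : (r + 1) * nt = r * nt + nt := by ring
  have e2 : (r + 1 + 1) * nt = r * nt + nt + nt := by ring
  simp only [pvNext, ← hr] at h2
  by_cases hc : pvTeamPick r mt nt < lo
  · rw [if_pos hc] at h2
    -- i ∈ [lo, pick (r+1)); round of i is r or r+1
    by_cases hlt : i < (r + 1) * nt
    · have hri : PySem.Int.floordiv i nt = r :=
        (PySem.Int.floordiv_eq_iff_of_pos (by omega)).mpr ⟨by linarith, hlt⟩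
      rw [hri] at hieq
      linarith
    · have hri : PySem.Int.floordiv i nt = r + 1 :=
        (PySem.Int.floordiv_eq_iff_of_pos (by omega)).mpr ⟨by linarith, by linarith⟩
      rw [hri] at hieq
      linarith
  · rw [if_neg hc] at h2
    have hri : PySem.Int.floordiv i nt = r :=
      (PySem.Int.floordiv_eq_iff_of_pos (by omega)).mpr ⟨by linarith, by linarith⟩
    rw [hri] at hieq
    linarith

theorem pv_next_unique (lo mt nt : Int) (h : 1 ≤ nt) (hm : 0 ≤ mt ∧ mt < nt)
    (m : Int) (h1 : lo ≤ m) (h2 : snake_order_py m nt = mt)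
    (h3 : ∀ i, lo ≤ i → i < m → snake_order_py i nt ≠ mt) :
    m = pvNext lo mt nt := by
  rcases lt_trichotomy m (pvNext lo mt nt) with hlt | he | hgt
  · exact absurd h2 (pv_next_least lo mt nt h hm m h1 hlt)
  · exact he
  · exact absurd (pv_next_match lo mt nt h hm)
      (h3 _ (pv_next_ge lo mt nt h hm) hgt)

-- number of keepers in the half-open interval [lo, m)
def pvKeep (ks : List Int) (lo m : Int) : Int :=
  ((ks.filter (fun k => lo ≤ k ∧ k < m)).length : Int)

theorem pv_keep_self (ks : List Int) (m : Int) : pvKeep ks m m = 0 := by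
  have h : ks.filter (fun k => decide (m ≤ k ∧ k < m)) = [] := by
    rw [List.filter_eq_nil_iff]
    intro k _
    simp only [decide_eq_true_eq, not_and]
    omega
  simp [pvKeep, h]

theorem pv_keep_step (ks : List Int) (hnd : ks.Nodup) (lo m : Int) (h : lo < m) :
    pvKeep ks lo m = (if lo ∈ ks then 1 else 0) + pvKeep ks (lo + 1) m := by
  induction ks with
  | nil => simp [pvKeep]
  | cons a t ih =>
    rw [List.nodup_cons] at hnd
    obtain ⟨ha, hndt⟩ := hnd
    have iht := ih hndt
    by_cases hae : a = lo
    · subst hae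
      have hf : t.filter (fun k => decide (a ≤ k ∧ k < m)) =
          t.filter (fun k => decide (a + 1 ≤ k ∧ k < m)) := by
        apply List.filter_congr
        intro x hx
        have hx' : x ≠ a := fun e => ha (e ▸ hx)
        simp only [decide_eq_decide]
        omega
      have c1 : decide (a ≤ a ∧ a < m) = true := by
        rw [decide_eq_true_eq]
        exact ⟨le_refl a, h⟩
      have c2 : decide (a + 1 ≤ a ∧ a < m) = false := by
        rw [decide_eq_false_iff_not]
        omega
      simp only [pvKeep, List.filter_cons, c1, c2, Bool.false_eq_true,
        List.mem_cons, true_or, if_pos, List.length_cons, hf]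
      push_cast
      omega
    · have hmem : (lo ∈ a :: t) ↔ (lo ∈ t) := by
        simp only [List.mem_cons]
        constructor
        · rintro (he | he)
          · exact absurd he.symm hae
          · exact he
        · exact Or.inr
      have hpq : decide (lo ≤ a ∧ a < m) = decide (lo + 1 ≤ a ∧ a < m) := by
        simp only [decide_eq_decide]
        omega
      simp only [pvKeep, List.filter_cons] at iht ⊢
      rw [hpq, if_congr hmem rfl rfl]
      by_cases hc : decide (lo + 1 ≤ a ∧ a < m) = true
      · rw [if_pos hc, if_pos hc]
        simp only [List.length_cons]
        by_cases h2 : lo ∈ t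
        · simp only [if_pos h2] at iht ⊢
          push_cast at iht ⊢
          omega
        · simp only [if_neg h2] at iht ⊢
          push_cast at iht ⊢
          omega
      · rw [if_neg hc, if_neg hc]
        exact iht

theorem pv_no_match_loop (mt nt : Int) (ks : List Int) (h : 1 ≤ nt)
    (hnm : ¬(0 ≤ mt ∧ mt < nt)) :
    ∀ (l : List Int) (count : Int), pvALoop mt nt ks l count = 999 := by
  intro l
  induction l with
  | nil => intro count; simp [pvALoop]
  | cons i rest ih =>
    intro count
    have hs := pv_snake_bounds i nt h
    have hne : snake_order_py i nt ≠ mt := by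
      intro he
      exact hnm ⟨he ▸ hs.1, he ▸ hs.2⟩
    simp only [pvALoop, if_neg hne]
    split <;> exact ih _

theorem pv_loop_eq (mt nt : Int) (h : 1 ≤ nt) (hm : 0 ≤ mt ∧ mt < nt)
    (ks : List Int) (hi : Int) :
    ∀ (n : Nat) (lo count : Int), (hi - lo).toNat = n →
    pvALoop mt nt ks (PySem.List.pyRange lo hi 1) count =
      if pvNext lo mt nt < hi then
        count + (pvNext lo mt nt - lo) - pvKeep (PySem.Set.ofList ks) lo (pvNext lo mt nt)
      else 999 := by
  intro n
  induction n with
  | zero =>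
    intro lo count hn
    have hle : hi ≤ lo := by omega
    rw [PySem.List.pyRange_one_eq_nil hle]
    have hge := pv_next_ge lo mt nt h hm
    rw [if_neg (by omega)]
    simp [pvALoop]
  | succ n ih =>
    intro lo count hn
    have hlt : lo < hi := by omega
    rw [PySem.List.pyRange_one_cons hlt]
    by_cases hmatch : snake_order_py lo nt = mt
    · have hNeq : pvNext lo mt nt = lo :=
        (pv_next_unique lo mt nt h hm lo le_rfl hmatch (by intro i hi1 hi2; omega)).symm
      simp only [pvALoop, if_pos hmatch]
      rw [if_pos (by omega), hNeq, pv_keep_self]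
      ring
    · have hNge := pv_next_ge lo mt nt h hm
      have hNm := pv_next_match lo mt nt h hm
      have hNne : lo ≠ pvNext lo mt nt := fun e => hmatch (e ▸ hNm)
      have hNlt : lo < pvNext lo mt nt := by omega
      have hNeq : pvNext (lo + 1) mt nt = pvNext lo mt nt := by
        refine (pv_next_unique (lo + 1) mt nt h hm (pvNext lo mt nt) (by omega) hNm ?_).symm
        intro i hi1 hi2
        exact pv_next_least lo mt nt h hm i (by omega) hi2
      have hstep0 := pv_keep_step (PySem.Set.ofList ks) (PySem.Set.nodup_ofList ks)
        lo (pvNext lo mt nt) hNlt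
      have hstep : pvKeep (PySem.Set.ofList ks) lo (pvNext lo mt nt) =
          (if lo ∈ ks then 1 else 0) + pvKeep (PySem.Set.ofList ks) (lo + 1) (pvNext lo mt nt) := by
        rw [hstep0, if_congr (PySem.Set.mem_ofList ks lo) rfl rfl]
      simp only [pvALoop, if_neg hmatch]
      split
      · rename_i hmem
        rw [ih (lo + 1) count (by omega), hNeq, if_pos hmem] at *
        split <;> [skip; rfl]
        omega
      · rename_i hmem
        rw [ih (lo + 1) (count + 1) (by omega), hNeq, if_neg hmem] at *
        split <;> [skip; rfl]
        omega

-- ===== VERDICT (by name: the statement is the Claim_ definition above) =====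
theorem competitive_picks_until_next_turn_py_spec : Claim_equal_competitive_picks_until_next_turn_py := by
  intro cp mt nt ks _hdom hpre
  unfold Spec_competitive_picks_until_next_turn_py
  unfold competitive_picks_until_next_turn_py competitive_picks_until_next_turn_py_alt
  rcases hpre with hnt | ⟨hnt0, hcp⟩
  case inr =>
    rw [PySem.List.pyRange_one_eq_nil (by omega)]
    rw [if_neg (by omega)]
    simp [pvALoop]
  by_cases hm : 0 ≤ mt ∧ mt < nt
  · rw [if_pos hm]
    rw [pv_loop_eq mt nt hnt hm ks (nt * 25 + 1) ((nt * 25 + 1) - (cp + 1)).toNat (cp + 1) 0 rfl]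
    have hnext : (if pvTeamPick (PySem.Int.floordiv (cp + 1) nt) mt nt ≤ cp then
        pvTeamPick (PySem.Int.floordiv (cp + 1) nt + 1) mt nt
        else pvTeamPick (PySem.Int.floordiv (cp + 1) nt) mt nt) = pvNext (cp + 1) mt nt := by
      simp only [pvNext]
      by_cases hc : pvTeamPick (PySem.Int.floordiv (cp + 1) nt) mt nt < cp + 1
      · rw [if_pos hc, if_pos (by omega)]
      · rw [if_neg hc, if_neg (by omega)]
    simp only [hnext]
    have hfilter : (PySem.Set.ofList ks).filter (fun k => (cp < k ∧ k < pvNext (cp + 1) mt nt : Prop)) =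
        (PySem.Set.ofList ks).filter (fun k => (cp + 1 ≤ k ∧ k < pvNext (cp + 1) mt nt : Prop)) := by
      apply List.filter_congr
      intro x _
      simp only [decide_eq_decide]
      omega
    by_cases hcond : pvNext (cp + 1) mt nt < nt * 25 + 1
    · rw [if_pos hcond, if_pos (by omega)]
      rw [hfilter]
      simp only [pvKeep]
      ring
    · rw [if_neg hcond, if_neg (by omega)]
  · rw [if_neg hm, pv_no_match_loop mt nt ks hnt hm]
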